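-- pv_equiv track=rewrite | github.com/IliaSilich/homework-7 | task_3.py | find_longest_shortest_words
-- ===== SOURCE A (Python) =====
-- def find_longest_shortest_words(words):
--     if not words or not all(isinstance(word, str) for word in words):
--         raise ValueError("Некорректный формат входных данных. Ожидается список слов.")
--
--     longest_word = ""
--     shortest_word = words[0]
--
--     for word in words:
--         if word > longest_word:
--             longest_word = word
--         if word < shortest_word:
--             shortest_word = word
--
--     return longest_word, shortest_word
-- ===== SOURCE B (Python) =====
-- def find_longest_shortest_words(words):
--     if not words or not all(isinstance(word, str) for word in words):
--         raise ValueError("Некорректный формат входных данных. Ожидается список слов.")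
--
--     ordered = sorted(words)
--     return ordered[-1], ordered[0]
-- ===== Notes on version B (the rewrite author's own statement) =====
-- stated objective: alternative
-- what changed: Replaces A's single-pass running max/min accumulation with sorting the list once and returning its last and first elements.
import Mathlib
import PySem

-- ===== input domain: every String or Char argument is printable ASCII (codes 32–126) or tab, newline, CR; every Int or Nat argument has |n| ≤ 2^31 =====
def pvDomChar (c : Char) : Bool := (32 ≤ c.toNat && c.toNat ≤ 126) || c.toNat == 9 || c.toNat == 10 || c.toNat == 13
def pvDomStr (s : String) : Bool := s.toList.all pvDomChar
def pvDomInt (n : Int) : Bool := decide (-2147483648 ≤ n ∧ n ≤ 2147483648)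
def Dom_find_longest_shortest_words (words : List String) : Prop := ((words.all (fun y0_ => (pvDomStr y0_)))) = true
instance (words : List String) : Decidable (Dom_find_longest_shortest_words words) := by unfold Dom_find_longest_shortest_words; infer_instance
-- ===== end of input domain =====

-- B replaces A's single-pass running max/min loop with sort-then-index (objective: alternative decomposition).

-- ===== PORT A =====
-- literal port of A's loop: state (longest_word, shortest_word), initialised ("", words[0])
def find_longest_shortest_words (words : List String) : String × String :=
  words.foldl
    (fun st word =>
      (if st.1 < word then word else st.1,
       if word < st.2 then word else st.2))
    ("", (PySem.List.pyGet? words 0).getD "")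

-- ===== PORT B =====
def find_longest_shortest_words_alt (words : List String) : String × String :=
  let ordered := PySem.List.sorted words (fun x => x) false
  ((PySem.List.pyGet? ordered (-1)).getD "", (PySem.List.pyGet? ordered 0).getD "")

-- ===== PRECONDITION & SPEC =====
-- A raises ValueError on an empty list; only that input is excluded.
def Pre_find_longest_shortest_words (words : List String) : Prop := words ≠ []
instance (words : List String) : Decidable (Pre_find_longest_shortest_words words) := by unfold Pre_find_longest_shortest_words; infer_instance
def pvWitness_find_longest_shortest_words : List String := ["b", "a"]

def Spec_find_longest_shortest_words (words : List String) (out : String × String) : Prop := out = find_longest_shortest_words_alt words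
instance (words : List String) (out : String × String) : Decidable (Spec_find_longest_shortest_words words out) := by unfold Spec_find_longest_shortest_words; infer_instance

-- ===== CLAIM (what is proved, stated in full; the proofs are below) =====
def Claim_equal_find_longest_shortest_words : Prop := ∀ (words : List String), Dom_find_longest_shortest_words words → Pre_find_longest_shortest_words words → Spec_find_longest_shortest_words words (find_longest_shortest_words words)

-- ===== LEMMAS AND PROOFS =====

-- A's loop body is componentwise max / min
theorem flsw_fold_eq (t : List String) (l s : String) :
    t.foldl
      (fun st word =>
        (if st.1 < word then word else st.1,
         if word < st.2 then word else st.2)) (l, s)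
    = (t.foldl max l, t.foldl min s) := by
  induction t generalizing l s with
  | nil => rfl
  | cons w t ih =>
      have hmax : (if l < w then w else l) = max l w := by
        by_cases h : l < w
        · rw [if_pos h, max_eq_right h.le]
        · rw [if_neg h, max_eq_left (not_lt.mp h)]
      have hmin : (if w < s then w else s) = min s w := by
        by_cases h : w < s
        · rw [if_pos h, min_eq_right h.le]
        · rw [if_neg h, min_eq_left (not_lt.mp h)]
      simp only [List.foldl_cons]
      rw [ih, hmax, hmin]

-- the last element of a (· ≤ ·)-pairwise list bounds every member
theorem pairwise_le_getLast (l : List String) (hne : l ≠ [])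
    (h : l.Pairwise (· ≤ ·)) : ∀ x ∈ l, x ≤ l.getLast hne := by
  induction l with
  | nil => exact absurd rfl hne
  | cons a t ih =>
      rcases List.pairwise_cons.mp h with ⟨ha, ht⟩
      intro x hx
      cases t with
      | nil =>
          simp only [List.mem_singleton] at hx
          subst hx; simp [List.getLast]
      | cons b u =>
          rw [List.getLast_cons (by simp)]
          rcases List.mem_cons.mp hx with rfl | hx'
          · exact le_trans (ha b List.mem_cons_self)
              (ih (by simp) ht b List.mem_cons_self)
          · exact ih (by simp) ht x hx'

theorem empty_le_string (s : String) : "" ≤ s := by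
  rw [String.le_iff_toList_le]
  have h : ("" : String).toList = [] := rfl
  rw [h]
  cases s.toList with
  | nil => exact le_refl _
  | cons c cs => exact le_of_lt (List.nil_lt_cons c cs)

-- ===== VERDICT (by name: the statement is the Claim_ definition above) =====
theorem find_longest_shortest_words_spec : Claim_equal_find_longest_shortest_words := by
  intro words _ hpre
  unfold Spec_find_longest_shortest_words
  cases words with
  | nil => exact absurd rfl hpre
  | cons w t =>
      unfold find_longest_shortest_words find_longest_shortest_words_alt
      simp only [PySem.List.pyGet?_zero_cons, Option.getD_some, List.foldl_cons]
      have hstep : (if ("" : String) < w then w else "") = w := by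
        rcases (empty_le_string w).lt_or_eq with h | h
        · rw [if_pos h]
        · rw [if_neg (by rw [← h]; exact lt_irrefl _), h]
      rw [hstep, if_neg (lt_irrefl w), flsw_fold_eq]
      -- B side: sorted list is nonempty
      set srt := PySem.List.sorted (w :: t) (fun x => x) false with hsrt
      have hne : srt ≠ [] := by
        rw [hsrt]; simp [PySem.List.sorted_eq_nil_iff]
      obtain ⟨m, tt, hcons⟩ := List.exists_cons_of_ne_nil hne
      have hperm : srt.Perm (w :: t) := PySem.List.sorted_perm _ _ _
      have hpw : srt.Pairwise (fun a b => a ≤ b) := by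
        simpa using PySem.List.sorted_pairwise (w :: t) (fun x => x)
      have hget0 : PySem.List.pyGet? srt 0 = some m := by
        rw [hcons]; exact PySem.List.pyGet?_zero_cons m tt
      have hgetlast : PySem.List.pyGet? srt (-1) = some (srt.getLast hne) := by
        rw [PySem.List.pyGet?_neg_one, List.getLast?_eq_some_getLast]
      rw [hget0, hgetlast]
      simp only [Option.getD_some]
      have hmaxmem : t.foldl max w = w ∨ t.foldl max w ∈ t := PySem.List.foldl_max_mem t w
      have hminmem : t.foldl min w = w ∨ t.foldl min w ∈ t := PySem.List.foldl_min_mem t w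
      have hmaxmem' : t.foldl max w ∈ (w :: t) := by rcases hmaxmem with h | h <;> simp [h]
      have hmaxub := PySem.List.le_foldl_max t w
      have hminlb := PySem.List.foldl_min_le t w
      rw [Prod.mk.injEq]
      constructor
      · -- max component = last of sorted
        have hlast_mem : srt.getLast hne ∈ (w :: t) := hperm.mem_iff.mp (List.getLast_mem hne)
        have h1 : srt.getLast hne ≤ t.foldl max w := by
          rcases List.mem_cons.mp hlast_mem with h | h
          · rw [h]; exact hmaxub.1
          · exact hmaxub.2 _ h
        have h2 : t.foldl max w ≤ srt.getLast hne :=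
          pairwise_le_getLast srt hne hpw _ (hperm.mem_iff.mpr hmaxmem')
        exact le_antisymm h2 h1
      · -- min component = head of sorted
        have hmhead : ∀ y ∈ (w :: t), m ≤ y :=
          PySem.List.key_head_sorted_le (w :: t) (fun x => x) (by rw [← hsrt, hcons])
        have hm_mem : m ∈ (w :: t) := hperm.mem_iff.mp (by simp [hcons])
        have h1 : m ≤ t.foldl min w := by
          rcases hminmem with h | h
          · rw [h]; exact hmhead _ List.mem_cons_self
          · exact hmhead _ (List.mem_cons_of_mem _ h)
        have h2 : t.foldl min w ≤ m := by
          rcases List.mem_cons.mp hm_mem with h | h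
          · rw [h]; exact hminlb.1
          · exact hminlb.2 _ h
        exact le_antisymm h2 h1
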